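-- pv_equiv track=rewrite | github.com/Tayjsl97/EmoMusicTV | EmoMusicTV_inpainting_eval.py | get_bars_Melody
-- ===== SOURCE A (Python) =====
-- def get_bars_Melody(bar_len,melody,i,last_timesign):
--         bar_cnt=0
--         piece_start=1
--         for j in range(len(melody)):
--             if melody[j]>=99:
--                 last_timesign=melody[j]
--             elif melody[j]==0 or j==len(melody)-1:
--                 if melody[j]==0 and j==len(melody)-1:
--                     melody_temp=[0]
--                     return last_timesign,melody_temp
--                 bar_cnt+=1
--                 if j==len(melody)-1:
--                    j+=1
--                 if bar_cnt!=1 and (bar_cnt-1)%bar_len==0: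
--                     if (bar_cnt-1)//bar_len==(i+1):
--                         melody_temp=melody[piece_start:j]
--                         if melody_temp[-1]>=99:
--                             melody_temp.pop()
--                         return last_timesign,melody_temp
--                     else:
--                         piece_start=j
-- ===== SOURCE B (Python) =====
-- def get_bars_Melody(bar_len, melody, i, last_timesign):
--     n = len(melody)
--     # One pass: every bar boundary (a 0, or the final token) together with the
--     # time signature in force there.
--     bounds = []
--     cur = last_timesign
--     for j, v in enumerate(melody):
--         if v >= 99:
--             cur = v
--         elif v == 0 or j == n - 1:
--             bounds.append((j, cur))
--     closed = n > 0 and melody[-1] == 0   # the piece ends on a closing bar terminator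
--     # Boundaries usable as the end of a bar group: the closing terminator of a
--     # closed piece only ends the piece, never a group.
--     usable = len(bounds) - 1 if closed else len(bounds)
--     end = (i + 1) * bar_len
--     if 1 <= end < usable:
--         pos, ts = bounds[end]
--         stop = pos + 1 if pos == n - 1 else pos
--         start = bounds[end - bar_len][0] if i > 0 else 1
--         seg = melody[start:stop]
--         if seg[-1] >= 99:   # drop a trailing time-signature marker
--             seg.pop()
--         return ts, seg
--     if closed:
--         # the requested group is not there; only the closing bar remains
--         return bounds[-1][1], [0]
--     return None
-- ===== Notes on version B (the rewrite author's own statement) =====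
-- stated objective: alternative
-- what changed: A's stateful counting loop (bar counter, running piece_start, in-loop modulo/quotient tests, early returns) is replaced by one pass that collects the list of bar-boundary positions paired with the time signature in force at each, followed by pure index arithmetic on that list (end boundary = bounds[(i+1)*bar_len], start boundary = bounds[end-bar_len]); …
-- outside the precondition, e.g. on get_bars_Melody(-1, [50, 50, 0, 0, 0, 0, 50, 50], -4, 100): A returns (100, [0]), B returns (100, [50, 0, 0, 0])
import Mathlib
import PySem

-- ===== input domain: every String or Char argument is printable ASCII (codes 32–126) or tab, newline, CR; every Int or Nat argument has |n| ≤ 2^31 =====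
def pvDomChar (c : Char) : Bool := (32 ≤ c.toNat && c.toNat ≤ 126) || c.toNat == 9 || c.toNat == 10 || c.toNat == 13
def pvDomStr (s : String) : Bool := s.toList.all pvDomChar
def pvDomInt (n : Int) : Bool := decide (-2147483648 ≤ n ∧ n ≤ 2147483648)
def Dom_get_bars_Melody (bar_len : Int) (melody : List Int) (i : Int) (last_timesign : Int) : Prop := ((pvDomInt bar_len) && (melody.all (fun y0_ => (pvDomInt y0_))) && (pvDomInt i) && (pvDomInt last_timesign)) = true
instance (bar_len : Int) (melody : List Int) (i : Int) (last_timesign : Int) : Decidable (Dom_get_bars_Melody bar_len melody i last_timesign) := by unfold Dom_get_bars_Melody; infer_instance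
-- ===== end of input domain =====

-- B replaces A's stateful counting loop by one boundary-collecting pass plus index arithmetic on the collected list; same cost, different decomposition.


-- ===== PORT A =====
-- A's for-loop over j with mutable bar_cnt/piece_start/last_timesign and early returns.
-- The 'none' in the slice branch is where Python raises IndexError (temp[-1] on []); excluded by Pre_.
def loopA (bar_len : Int) (melody : List Int) (i : Int) (j : Nat) (bar_cnt : Int) (piece_start : Int) (ts : Int) : Option (Int × List Int) :=
  if j < melody.length then
    if 99 ≤ melody.getD j 0 then loopA bar_len melody i (j+1) bar_cnt piece_start (melody.getD j 0)
    else if melody.getD j 0 = 0 ∨ j = melody.length - 1 then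
      if melody.getD j 0 = 0 ∧ j = melody.length - 1 then some (ts, [0])
      else
        if bar_cnt + 1 ≠ 1 ∧ PySem.Int.mod (bar_cnt + 1 - 1) bar_len = 0 then
          if PySem.Int.floordiv (bar_cnt + 1 - 1) bar_len = i + 1 then
            match (PySem.List.slice melody (some piece_start)
                (some (((if j = melody.length - 1 then j + 1 else j) : Nat) : Int))).getLast? with
            | some x =>
                if 99 ≤ x then
                  some (ts, (PySem.List.slice melody (some piece_start)
                    (some (((if j = melody.length - 1 then j + 1 else j) : Nat) : Int))).dropLast)
                else
                  some (ts, PySem.List.slice melody (some piece_start)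
                    (some (((if j = melody.length - 1 then j + 1 else j) : Nat) : Int)))
            | none => none
          else loopA bar_len melody i (j+1) (bar_cnt + 1) (((if j = melody.length - 1 then j + 1 else j) : Nat) : Int) ts
        else loopA bar_len melody i (j+1) (bar_cnt + 1) piece_start ts
    else loopA bar_len melody i (j+1) bar_cnt piece_start ts
  else none
termination_by melody.length - j
decreasing_by all_goals omega

def get_bars_Melody (bar_len : Int) (melody : List Int) (i : Int) (last_timesign : Int) : Option (Int × List Int) :=
  loopA bar_len melody i 0 0 1 last_timesign

-- ===== PORT B =====
-- Source B's boundary-collecting pass: (position, time signature in force there) for every bar boundary.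
def pairsB (melody : List Int) (j : Nat) (cur : Int) : List (Nat × Int) :=
  if j < melody.length then
    let v := melody.getD j 0
    if 99 ≤ v then pairsB melody (j+1) v
    else if v = 0 ∨ j = melody.length - 1 then (j, cur) :: pairsB melody (j+1) cur
    else pairsB melody (j+1) cur
  else []
termination_by melody.length - j
decreasing_by all_goals omega

-- Source B's selection by index arithmetic on the collected boundary list.
-- 'melody.getLast? = some 0' is Source B's 'closed'; the usable-boundary count is length-1 on a closed piece.
-- The 'none' in the slice branch is where Source B raises IndexError (seg[-1] on []); excluded by Pre_.
def altCore (bar_len : Int) (melody : List Int) (i : Int) (bounds : List (Nat × Int)) : Option (Int × List Int) :=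
  if 1 ≤ (i + 1) * bar_len ∧ (i + 1) * bar_len <
      (if melody.getLast? = some (0:Int) then (bounds.length : Int) - 1 else (bounds.length : Int)) then
    match (PySem.List.slice melody
        (some (if 0 < i then (((bounds.getD (((i + 1) * bar_len - bar_len).toNat) (0, 0)).1 : Nat) : Int) else 1))
        (some (((if (bounds.getD ((i + 1) * bar_len).toNat (0, 0)).1 = melody.length - 1 then
            (bounds.getD ((i + 1) * bar_len).toNat (0, 0)).1 + 1 else
            (bounds.getD ((i + 1) * bar_len).toNat (0, 0)).1) : Nat) : Int))).getLast? with
    | some x =>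
        if 99 ≤ x then
          some ((bounds.getD ((i + 1) * bar_len).toNat (0, 0)).2,
            (PySem.List.slice melody
              (some (if 0 < i then (((bounds.getD (((i + 1) * bar_len - bar_len).toNat) (0, 0)).1 : Nat) : Int) else 1))
              (some (((if (bounds.getD ((i + 1) * bar_len).toNat (0, 0)).1 = melody.length - 1 then
                  (bounds.getD ((i + 1) * bar_len).toNat (0, 0)).1 + 1 else
                  (bounds.getD ((i + 1) * bar_len).toNat (0, 0)).1) : Nat) : Int))).dropLast)
        else
          some ((bounds.getD ((i + 1) * bar_len).toNat (0, 0)).2,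
            PySem.List.slice melody
              (some (if 0 < i then (((bounds.getD (((i + 1) * bar_len - bar_len).toNat) (0, 0)).1 : Nat) : Int) else 1))
              (some (((if (bounds.getD ((i + 1) * bar_len).toNat (0, 0)).1 = melody.length - 1 then
                  (bounds.getD ((i + 1) * bar_len).toNat (0, 0)).1 + 1 else
                  (bounds.getD ((i + 1) * bar_len).toNat (0, 0)).1) : Nat) : Int)))
    | none => none
  else if melody.getLast? = some (0:Int) then
    match PySem.List.pyGet? bounds (-1) with
    | some pr => some (pr.2, [0])
    | none => none
  else none

def get_bars_Melody_alt (bar_len : Int) (melody : List Int) (i : Int) (last_timesign : Int) : Option (Int × List Int) :=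
  altCore bar_len melody i (pairsB melody 0 last_timesign)

-- ===== PRECONDITION & SPEC =====
-- the bar-boundary positions of melody (independent of both ports)
def pvBoundList (melody : List Int) : List Nat :=
  (List.range melody.length).filter
    (fun j => decide (melody.getD j 0 < 99 ∧ (melody.getD j 0 = 0 ∨ j = melody.length - 1)))

-- Pre_ excludes (a) the inputs on which both programs raise — ZeroDivisionError (bar_len=0 reaching a
-- second countable boundary) and IndexError (seg[-1] on the empty first slice) — and (b) the
-- out-of-natural-domain combination bar_len < 0 with i ≤ -3 (bar-group size and group index are
-- nonnegative counts), on which A's segment start arises from multiples of a negative modulus.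
def Pre_get_bars_Melody (bar_len : Int) (melody : List Int) (i : Int) (last_timesign : Int) : Prop :=
  (bar_len = 0 → ¬(2 ≤ (pvBoundList melody).length ∧
      ¬((pvBoundList melody).getD 1 0 = melody.length - 1 ∧ melody.getLast? = some (0:Int))))
  ∧ ¬((i + 1) * bar_len = 1 ∧ 3 ≤ melody.length ∧ melody.getD 0 1 = 0 ∧ melody.getD 1 1 = 0)
  ∧ ¬(bar_len < 0 ∧ i ≤ -3)
instance (bar_len : Int) (melody : List Int) (i : Int) (last_timesign : Int) : Decidable (Pre_get_bars_Melody bar_len melody i last_timesign) := by unfold Pre_get_bars_Melody; infer_instance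

def pvWitness_get_bars_Melody : Int × List Int × Int × Int := (2, [1, 0, 3, 0, 5, 0, 7], 0, 100)

def Spec_get_bars_Melody (bar_len : Int) (melody : List Int) (i : Int) (last_timesign : Int) (out : Option (Int × List Int)) : Prop := out = get_bars_Melody_alt bar_len melody i last_timesign
instance (bar_len : Int) (melody : List Int) (i : Int) (last_timesign : Int) (out : Option (Int × List Int)) : Decidable (Spec_get_bars_Melody bar_len melody i last_timesign out) := by unfold Spec_get_bars_Melody; infer_instance

-- ===== CLAIM (what is proved, stated in full; the proofs are below) =====
def Claim_equal_get_bars_Melody : Prop := ∀ (bar_len : Int) (melody : List Int) (i : Int) (last_timesign : Int), Dom_get_bars_Melody bar_len melody i last_timesign → Pre_get_bars_Melody bar_len melody i last_timesign → Spec_get_bars_Melody bar_len melody i last_timesign (get_bars_Melody bar_len melody i last_timesign)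

-- ===== LEMMAS AND PROOFS =====

-- proof-side reformulation of altCore with A-shaped guards (range test via length and an exclusion
-- clause, start index via |bar_len|); proved equal to altCore on the natural domain below.
def coreO (bar_len : Int) (melody : List Int) (i : Int) (pairs : List (Nat × Int)) : Option (Int × List Int) :=
  if 1 ≤ (i + 1) * bar_len ∧ (i + 1) * bar_len < (pairs.length : Int) ∧
      ¬((0 < melody.length ∧ melody.getLast? = some (0:Int)) ∧ (i + 1) * bar_len = (pairs.length : Int) - 1) then
    match (PySem.List.slice melody
        (some (if (bar_len.natAbs : Int) < (i + 1) * bar_len then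
            (((pairs.getD (((i + 1) * bar_len).toNat - bar_len.natAbs) (0, 0)).1 : Nat) : Int) else 1))
        (some (((if (pairs.getD ((i + 1) * bar_len).toNat (0, 0)).1 = melody.length - 1 then
            (pairs.getD ((i + 1) * bar_len).toNat (0, 0)).1 + 1 else
            (pairs.getD ((i + 1) * bar_len).toNat (0, 0)).1) : Nat) : Int))).getLast? with
    | some x =>
        if 99 ≤ x then
          some ((pairs.getD ((i + 1) * bar_len).toNat (0, 0)).2,
            (PySem.List.slice melody
              (some (if (bar_len.natAbs : Int) < (i + 1) * bar_len then
                  (((pairs.getD (((i + 1) * bar_len).toNat - bar_len.natAbs) (0, 0)).1 : Nat) : Int) else 1))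
              (some (((if (pairs.getD ((i + 1) * bar_len).toNat (0, 0)).1 = melody.length - 1 then
                  (pairs.getD ((i + 1) * bar_len).toNat (0, 0)).1 + 1 else
                  (pairs.getD ((i + 1) * bar_len).toNat (0, 0)).1) : Nat) : Int))).dropLast)
        else
          some ((pairs.getD ((i + 1) * bar_len).toNat (0, 0)).2,
            PySem.List.slice melody
              (some (if (bar_len.natAbs : Int) < (i + 1) * bar_len then
                  (((pairs.getD (((i + 1) * bar_len).toNat - bar_len.natAbs) (0, 0)).1 : Nat) : Int) else 1))
              (some (((if (pairs.getD ((i + 1) * bar_len).toNat (0, 0)).1 = melody.length - 1 then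
                  (pairs.getD ((i + 1) * bar_len).toNat (0, 0)).1 + 1 else
                  (pairs.getD ((i + 1) * bar_len).toNat (0, 0)).1) : Nat) : Int)))
    | none => none
  else if (0 < melody.length ∧ melody.getLast? = some (0:Int)) ∧ pairs ≠ [] then
    match pairs.getLast? with
    | some pr => some (pr.2, [0])
    | none => none
  else none

lemma getLast?_cons_ne {α : Type} (a : α) (l : List α) (h : l ≠ []) :
    (a :: l).getLast? = l.getLast? := by
  cases l with
  | nil => simp at h
  | cons b t => simp [List.getLast?_cons_cons]

lemma pairsB_mem (melody : List Int) : ∀ (j : Nat) (cur : Int) (pr : Nat × Int),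
    pr ∈ pairsB melody j cur →
    j ≤ pr.1 ∧ pr.1 < melody.length ∧ melody.getD pr.1 0 < 99 ∧
      (melody.getD pr.1 0 = 0 ∨ pr.1 = melody.length - 1) := by
  intro j cur
  induction j, cur using pairsB.induct melody with
  | case1 j cur h v hv ih =>
      intro pr hpr
      rw [pairsB, if_pos h, if_pos hv] at hpr
      have := ih pr hpr
      exact ⟨by omega, this.2.1, this.2.2.1, this.2.2.2⟩
  | case2 j cur h v hv hb ih =>
      intro pr hpr
      rw [pairsB, if_pos h, if_neg hv, if_pos hb] at hpr
      rcases List.mem_cons.mp hpr with h' | h'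
      · subst h'; exact ⟨le_refl _, h, by simpa using hv, hb⟩
      · have := ih pr h'
        exact ⟨by omega, this.2.1, this.2.2.1, this.2.2.2⟩
  | case3 j cur h v hv hb ih =>
      intro pr hpr
      rw [pairsB, if_pos h, if_neg hv, if_neg hb] at hpr
      have := ih pr hpr
      exact ⟨by omega, this.2.1, this.2.2.1, this.2.2.2⟩
  | case4 j cur h =>
      intro pr hpr
      rw [pairsB, if_neg h] at hpr
      simp at hpr

lemma pairsB_sorted (melody : List Int) : ∀ (j : Nat) (cur : Int),
    List.Pairwise (fun a b : Nat × Int => a.1 < b.1) (pairsB melody j cur) := by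
  intro j cur
  induction j, cur using pairsB.induct melody with
  | case1 j cur h v hv ih => rw [pairsB, if_pos h, if_pos hv]; exact ih
  | case2 j cur h v hv hb ih =>
      rw [pairsB, if_pos h, if_neg hv, if_pos hb]
      refine List.pairwise_cons.mpr ⟨?_, ih⟩
      intro pr hpr
      have := pairsB_mem melody (j+1) cur pr hpr
      omega
  | case3 j cur h v hv hb ih => rw [pairsB, if_pos h, if_neg hv, if_neg hb]; exact ih
  | case4 j cur h => rw [pairsB, if_neg h]; exact List.Pairwise.nil

lemma pairsB_map_fst (melody : List Int) : ∀ (j : Nat) (cur : Int),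
    (List.range' j (melody.length - j)).filter
      (fun k => decide (melody.getD k 0 < 99 ∧ (melody.getD k 0 = 0 ∨ k = melody.length - 1)))
      = (pairsB melody j cur).map Prod.fst := by
  intro j cur
  induction j, cur using pairsB.induct melody with
  | case1 j cur h v hv ih =>
      rw [pairsB, if_pos h, if_pos hv]
      have hr : melody.length - j = (melody.length - (j+1)) + 1 := by omega
      rw [hr, List.range'_succ, List.filter_cons]
      have hnc : ¬ (melody.getD j 0 < 99 ∧ (melody.getD j 0 = 0 ∨ j = melody.length - 1)) := by
        intro hc; omega
      simp only [decide_eq_true_eq]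
      rw [if_neg hnc]
      exact ih
  | case2 j cur h v hv hb ih =>
      rw [pairsB, if_pos h, if_neg hv, if_pos hb]
      have hr : melody.length - j = (melody.length - (j+1)) + 1 := by omega
      rw [hr, List.range'_succ, List.filter_cons]
      have hc : (melody.getD j 0 < 99 ∧ (melody.getD j 0 = 0 ∨ j = melody.length - 1)) := by
        constructor
        · omega
        · exact hb
      simp only [decide_eq_true_eq]
      rw [if_pos hc, ih]; rfl
  | case3 j cur h v hv hb ih =>
      rw [pairsB, if_pos h, if_neg hv, if_neg hb]
      have hr : melody.length - j = (melody.length - (j+1)) + 1 := by omega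
      rw [hr, List.range'_succ, List.filter_cons]
      have hnc : ¬ (melody.getD j 0 < 99 ∧ (melody.getD j 0 = 0 ∨ j = melody.length - 1)) := by
        intro hc; exact hb hc.2
      simp only [decide_eq_true_eq]
      rw [if_neg hnc]
      exact ih
  | case4 j cur h =>
      rw [pairsB, if_neg h]
      have : melody.length - j = 0 := by omega
      simp [this]

lemma pvBoundList_eq (melody : List Int) (cur : Int) :
    pvBoundList melody = (pairsB melody 0 cur).map Prod.fst := by
  have := pairsB_map_fst melody 0 cur
  simpa [pvBoundList, List.range_eq_range'] using this

lemma pairsB_getLast_zeroEnd (melody : List Int) : ∀ (j : Nat) (cur : Int),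
    melody.getLast? = some 0 → j ≤ melody.length - 1 →
    ∃ t, (pairsB melody j cur).getLast? = some (melody.length - 1, t) := by
  intro j cur
  induction j, cur using pairsB.induct melody with
  | case1 j cur h v hv ih =>
      intro hz hj
      rw [pairsB, if_pos h, if_pos hv]
      by_cases hlast : j = melody.length - 1
      · exfalso
        rw [List.getLast?_eq_getElem?] at hz
        have hg : melody.getD j 0 = 0 := by
          rw [List.getD, hlast, hz]; rfl
        omega
      · exact ih hz (by omega)
  | case2 j cur h v hv hb ih =>
      intro hz hj
      rw [pairsB, if_pos h, if_neg hv, if_pos hb]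
      by_cases hlast : j = melody.length - 1
      · refine ⟨cur, ?_⟩
        have he : pairsB melody (j+1) cur = [] := by
          rw [pairsB, if_neg (by omega)]
        rw [he]
        simp [hlast]
      · obtain ⟨t, ht⟩ := ih hz (by omega)
        refine ⟨t, ?_⟩
        have hne : pairsB melody (j+1) cur ≠ [] := by
          intro he; rw [he] at ht; simp at ht
        rw [getLast?_cons_ne _ _ hne, ht]
  | case3 j cur h v hv hb ih =>
      intro hz hj
      rw [pairsB, if_pos h, if_neg hv, if_neg hb]
      by_cases hlast : j = melody.length - 1
      · exact absurd (Or.inr hlast) hb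
      · exact ih hz (by omega)
  | case4 j cur h =>
      intro hz hj
      exfalso
      have hne : melody ≠ [] := by intro he; simp [he] at hz
      have : 0 < melody.length := List.length_pos_iff.mpr hne
      omega

lemma fdiv_exact (a b : Int) (hb : b ≠ 0) : PySem.Int.floordiv (a * b) b = a := by
  have h1 := PySem.Int.floordiv_mul_add_mod (a * b) b
  have h2 : PySem.Int.mod (a * b) b = 0 :=
    (PySem.Int.mod_eq_zero_iff_dvd _ _).mpr ⟨a, mul_comm a b⟩
  rw [h2, add_zero] at h1
  exact mul_right_cancel₀ hb h1

lemma sub_one_div_mul (L c : Nat) (hL : 0 < L) (hd : L ∣ c) (hc : 0 < c) :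
    (c - 1) / L * L = c - L := by
  obtain ⟨m, rfl⟩ := hd
  have hm : 0 < m := by
    rcases Nat.eq_zero_or_pos m with h | h
    · subst h; simp at hc
    · exact h
  have hLm : L * m = L * (m - 1) + L := by
    conv_lhs => rw [show m = m - 1 + 1 by omega]
    rw [Nat.mul_succ]
  have h1 : L * m - 1 = L * (m - 1) + (L - 1) := by omega
  rw [h1, Nat.mul_add_div hL, Nat.div_eq_of_lt (by omega), Nat.add_zero, Nat.mul_comm]
  omega

lemma div_pred_of_not_dvd (L c : Nat) (hd : ¬ L ∣ c) (hc : 0 < c) :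
    c / L = (c - 1) / L := by
  have h : c = (c - 1) + 1 := by omega
  rw [h, Nat.succ_div]
  rw [← h]
  simp [hd]

lemma getD_last_zero (melody : List Int) (j : Nat) (hj1 : j = melody.length - 1)
    (hz : melody.getLast? = some (0:Int)) : melody.getD j 0 = 0 := by
  rw [List.getLast?_eq_getElem?] at hz
  rw [List.getD, hj1, hz]; rfl

lemma coreO_eq_none (bar_len : Int) (melody : List Int) (i : Int) (P : List (Nat × Int))
    (h1 : 1 ≤ (i + 1) * bar_len → (P.length : Int) ≤ (i + 1) * bar_len)
    (h2 : ¬ (0 < melody.length ∧ melody.getLast? = some (0:Int))) :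
    coreO bar_len melody i P = none := by
  unfold coreO
  rw [if_neg, if_neg]
  · intro h; exact h2 h.1
  · intro h
    have := h1 h.1
    have := h.2.1
    omega

lemma loopA_eq_coreO (bar_len : Int) (melody : List Int) (i : Int) (lt0 : Int)
    (hPre : Pre_get_bars_Melody bar_len melody i lt0) :
    ∀ (fuel j c : Nat) (ps ts : Int),
    melody.length - j ≤ fuel → j ≤ melody.length →
    pairsB melody j ts = (pairsB melody 0 lt0).drop c →
    c ≤ (pairsB melody 0 lt0).length →
    (1 ≤ (i + 1) * bar_len → (c : Int) ≤ (i + 1) * bar_len) →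
    (bar_len ≠ 0 → ps = (if bar_len.natAbs < c then
        (((pairsB melody 0 lt0).getD ((c - 1) / bar_len.natAbs * bar_len.natAbs) (0, 0)).1 : Int)
      else 1)) →
    ((0 < melody.length ∧ melody.getLast? = some 0) → j < melody.length) →
    loopA bar_len melody i j (c : Int) ps ts = coreO bar_len melody i (pairsB melody 0 lt0) := by
  intro fuel
  induction fuel with
  | zero =>
      intro j c ps ts hfuel hjn h1 hc h3 h4 h6
      have hj : ¬ j < melody.length := by omega
      rw [loopA, if_neg hj]
      rw [pairsB, if_neg hj] at h1
      have hclen : (pairsB melody 0 lt0).length ≤ c := by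
        have := congrArg List.length h1
        simp at this
        omega
      refine (coreO_eq_none bar_len melody i _ ?_ ?_).symm
      · intro ht; have := h3 ht; omega
      · intro hz; have := h6 hz; omega
  | succ f ihf =>
      intro j c ps ts hfuel hjn h1 hc h3 h4 h6
      by_cases hj : j < melody.length
      case neg =>
        rw [loopA, if_neg hj]
        rw [pairsB, if_neg hj] at h1
        have hclen : (pairsB melody 0 lt0).length ≤ c := by
          have := congrArg List.length h1
          simp at this
          omega
        refine (coreO_eq_none bar_len melody i _ ?_ ?_).symm
        · intro ht; have := h3 ht; omega
        · intro hz; have := h6 hz; omega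
      case pos =>
      rw [loopA, if_pos hj]
      by_cases hts : 99 ≤ melody.getD j 0
      case pos =>
        rw [if_pos hts]
        rw [pairsB, if_pos hj, if_pos hts] at h1
        apply ihf (j+1) c ps (melody.getD j 0) (by omega) (by omega) h1 hc h3 h4
        intro hz
        by_contra hlt
        have hj1 : j = melody.length - 1 := by omega
        rw [List.getLast?_eq_getElem?] at hz
        have hg : melody.getD j 0 = 0 := by
          rw [List.getD, hj1, hz.2]; rfl
        omega
      case neg =>
        rw [if_neg hts]
        by_cases hb : melody.getD j 0 = 0 ∨ j = melody.length - 1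
        case neg =>
          rw [if_neg hb]
          rw [pairsB, if_pos hj, if_neg hts, if_neg hb] at h1
          apply ihf (j+1) c ps ts (by omega) (by omega) h1 hc h3 h4
          intro hz
          by_contra hlt
          exact hb (Or.inr (by omega))
        case pos =>
          rw [if_pos hb]
          rw [pairsB, if_pos hj, if_neg hts, if_pos hb] at h1
          have hPc : (pairsB melody 0 lt0)[c]? = some (j, ts) := by
            have h0 : ((pairsB melody 0 lt0).drop c)[0]? = some (j, ts) := by
              rw [← h1]; rfl
            rw [List.getElem?_drop] at h0
            simpa using h0
          have hclt : c < (pairsB melody 0 lt0).length := by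
            by_contra hcl
            rw [List.getElem?_eq_none (by omega)] at hPc
            simp at hPc
          have hdrop1 : pairsB melody (j+1) ts = (pairsB melody 0 lt0).drop (c+1) := by
            have := congrArg List.tail h1
            simpa [List.tail_drop] using this
          by_cases hzl : melody.getD j 0 = 0 ∧ j = melody.length - 1
          case pos =>
            rw [if_pos hzl]
            have hn1 : j + 1 = melody.length := by omega
            have hnil : pairsB melody (j+1) ts = [] := by rw [pairsB, if_neg (by omega)]
            rw [hnil] at hdrop1
            have hcl : c = (pairsB melody 0 lt0).length - 1 := by
              have := congrArg List.length hdrop1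
              simp at this
              omega
            have hj0 : melody[j] = (0:Int) := by
              have h := hzl.1
              rwa [List.getD_eq_getElem _ _ hj] at h
            have hze : melody.getLast? = some (0:Int) := by
              rw [List.getLast?_eq_getElem?, ← hzl.2, List.getElem?_eq_getElem hj, hj0]
            have hneg : ¬ (1 ≤ (i + 1) * bar_len ∧ (i + 1) * bar_len < ((pairsB melody 0 lt0).length : Int) ∧
                ¬((0 < melody.length ∧ melody.getLast? = some (0:Int)) ∧
                  (i + 1) * bar_len = ((pairsB melody 0 lt0).length : Int) - 1)) := by
              intro hcond
              obtain ⟨ht1, ht2, ht3⟩ := hcond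
              have hct := h3 ht1
              exact ht3 ⟨⟨by omega, hze⟩, by omega⟩
            have hpos : (0 < melody.length ∧ melody.getLast? = some (0:Int)) ∧
                pairsB melody 0 lt0 ≠ [] := by
              refine ⟨⟨by omega, hze⟩, ?_⟩
              intro h
              rw [h] at hclt
              simp at hclt
            unfold coreO
            rw [if_neg hneg, if_pos hpos]
            rw [List.getLast?_eq_getElem?, ← hcl, hPc]
          case neg =>
            rw [if_neg hzl]
            by_cases hcnd : (c : Int) + 1 ≠ 1 ∧ PySem.Int.mod ((c : Int) + 1 - 1) bar_len = 0
            case pos =>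
              rw [if_pos hcnd]
              have hc1 : 1 ≤ c := by
                have := hcnd.1
                omega
              -- bar_len = 0 here would be A's ZeroDivisionError, excluded by Pre_
              have hbl : bar_len ≠ 0 := by
                intro hb0
                have h2len : 1 < (pairsB melody 0 lt0).length := by omega
                apply hPre.1 hb0
                refine ⟨by rw [pvBoundList_eq melody lt0, List.length_map]; omega, ?_⟩
                rintro ⟨hb1, hlz⟩
                rw [pvBoundList_eq melody lt0] at hb1
                rw [List.getD_eq_getElem _ _ (by simpa using h2len), List.getElem_map] at hb1
                rcases Nat.eq_or_lt_of_le hc1 with hc1' | hc2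
                · have hP1 : (pairsB melody 0 lt0)[1]? = some (j, ts) := by
                    rw [show (1:Nat) = c by omega]
                    exact hPc
                  have hP1' : (pairsB melody 0 lt0)[1] = (j, ts) := by
                    rw [List.getElem?_eq_getElem h2len] at hP1
                    exact Option.some.inj hP1
                  rw [hP1'] at hb1
                  exact hzl ⟨getD_last_zero melody j hb1 hlz, hb1⟩
                · have hs := (List.pairwise_iff_getElem.mp (pairsB_sorted melody 0 lt0)) 1 c
                    h2len hclt hc2
                  have hPcg : (pairsB melody 0 lt0)[c] = (j, ts) := by
                    rw [List.getElem?_eq_getElem hclt] at hPc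
                    exact Option.some.inj hPc
                  rw [hPcg, hb1] at hs
                  omega
              have hL : 0 < bar_len.natAbs := Int.natAbs_pos.mpr hbl
              have hdvd : bar_len ∣ (c : Int) := by
                have := hcnd.2
                simp only [add_sub_cancel_right] at this
                exact (PySem.Int.mod_eq_zero_iff_dvd _ _).mp this
              have hLdvd : bar_len.natAbs ∣ c := by
                have := Int.natAbs_dvd_natAbs.mpr hdvd
                simpa using this
              have hPcg : (pairsB melody 0 lt0)[c] = (j, ts) := by
                rw [List.getElem?_eq_getElem hclt] at hPc
                exact Option.some.inj hPc
              by_cases hq : PySem.Int.floordiv ((c : Int) + 1 - 1) bar_len = i + 1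
              case pos =>
                rw [if_pos hq]
                simp only [add_sub_cancel_right] at hq
                have hceq : (c : Int) = (i + 1) * bar_len := by
                  have hm := PySem.Int.floordiv_mul_add_mod (c : Int) bar_len
                  have hm0 : PySem.Int.mod (c : Int) bar_len = 0 :=
                    (PySem.Int.mod_eq_zero_iff_dvd _ _).mpr hdvd
                  rw [hq, hm0, add_zero] at hm
                  omega
                have hps' : ps = (if bar_len.natAbs < c then
                    (((pairsB melody 0 lt0).getD (c - bar_len.natAbs) (0, 0)).1 : Int) else 1) := by
                  have h := h4 hbl
                  rwa [sub_one_div_mul bar_len.natAbs c hL hLdvd (by omega)] at h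
                have hg3 : ¬((0 < melody.length ∧ melody.getLast? = some (0:Int)) ∧
                    (i + 1) * bar_len = ((pairsB melody 0 lt0).length : Int) - 1) := by
                  rintro ⟨⟨hn0, hlz⟩, he⟩
                  rw [← hceq] at he
                  have hcl : c = (pairsB melody 0 lt0).length - 1 := by omega
                  obtain ⟨t, hlast⟩ := pairsB_getLast_zeroEnd melody 0 lt0 hlz (by omega)
                  rw [List.getLast?_eq_getElem?, ← hcl, hPc] at hlast
                  have hjn1 : j = melody.length - 1 := by
                    have h' := congrArg Prod.fst (Option.some.inj hlast)
                    simpa using h'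
                  exact hzl ⟨getD_last_zero melody j hjn1 hlz, hjn1⟩
                unfold coreO
                rw [← hceq]
                have hg : 1 ≤ (c : Int) ∧ (c : Int) < ((pairsB melody 0 lt0).length : Int) ∧
                    ¬((0 < melody.length ∧ melody.getLast? = some (0:Int)) ∧
                      (c : Int) = ((pairsB melody 0 lt0).length : Int) - 1) :=
                  ⟨by exact_mod_cast hc1, by exact_mod_cast hclt, by rw [hceq]; exact hg3⟩
                rw [if_pos hg]
                simp only [Int.toNat_natCast, List.getD_eq_getElem?_getD, hPc,
                  Option.getD_some, Nat.cast_lt]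
                simp only [List.getD_eq_getElem?_getD] at hps'
                rw [← hps']
              case neg =>
                rw [if_neg hq]
                simp only [add_sub_cancel_right] at hq
                have hcne : (c : Int) ≠ (i + 1) * bar_len := by
                  intro he
                  exact hq (by rw [he]; exact fdiv_exact (i+1) bar_len hbl)
                by_cases hj1 : j = melody.length - 1
                case pos =>
                  rw [loopA, if_neg (by omega)]
                  have hnil : pairsB melody (j+1) ts = [] := by rw [pairsB, if_neg (by omega)]
                  rw [hnil] at hdrop1
                  have hcl : c + 1 = (pairsB melody 0 lt0).length := by
                    have := congrArg List.length hdrop1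
                    simp at this
                    omega
                  refine (coreO_eq_none bar_len melody i _ ?_ ?_).symm
                  · intro ht
                    have := h3 ht
                    omega
                  · rintro ⟨hn0, hlz⟩
                    exact hzl ⟨getD_last_zero melody j hj1 hlz, hj1⟩
                case neg =>
                  rw [if_neg hj1]
                  have hf1 : melody.length - (j + 1) ≤ f := by omega
                  have hf2 : j + 1 ≤ melody.length := by omega
                  have hf3 : c + 1 ≤ (pairsB melody 0 lt0).length := by omega
                  have H := ihf (j+1) (c+1) ((j : Nat) : Int)
                    ts hf1 hf2 hdrop1 hf3 ?_ ?_ ?_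
                  · exact_mod_cast H
                  · intro ht
                    have h5 := h3 ht
                    have h6' : (c : Int) < (i + 1) * bar_len := lt_of_le_of_ne h5 hcne
                    push_cast
                    omega
                  · intro _
                    have hLle : bar_len.natAbs ≤ c := Nat.le_of_dvd (by omega) hLdvd
                    rw [if_pos (show bar_len.natAbs < c + 1 by omega),
                      Nat.add_sub_cancel, Nat.div_mul_cancel hLdvd,
                      List.getD_eq_getElem?_getD, hPc]
                    rfl
                  · intro hz
                    by_contra hlt
                    exact hzl ⟨getD_last_zero melody j (by omega) hz.2, by omega⟩
            case neg =>
              rw [if_neg hcnd]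
              have hf1 : melody.length - (j + 1) ≤ f := by omega
              have hf2 : j + 1 ≤ melody.length := by omega
              have hf3 : c + 1 ≤ (pairsB melody 0 lt0).length := by omega
              have hLpos : bar_len ≠ 0 → 0 < bar_len.natAbs := by
                intro h; exact Int.natAbs_pos.mpr h
              have hnd : (c : Int) + 1 = 1 ∨ ¬ bar_len ∣ (c : Int) := by
                by_cases h0 : (c : Int) + 1 = 1
                · exact Or.inl h0
                · refine Or.inr ?_
                  intro hdvd
                  exact hcnd ⟨h0, by
                    simpa using (PySem.Int.mod_eq_zero_iff_dvd ((c : Int) + 1 - 1) bar_len).mpr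
                      (by simpa using hdvd)⟩
              have hcne : c = 0 ∨ ¬ bar_len.natAbs ∣ c := by
                rcases hnd with h | h
                · left; omega
                · right; intro hd
                  exact h (Int.natAbs_dvd_natAbs.mp (by simpa using hd))
              have H := ihf (j+1) (c+1) ps ts hf1 hf2 hdrop1 hf3
                ?_ ?_ ?_
              · push_cast at H
                exact H
              · -- c + 1 ≤ target when 1 ≤ target
                intro ht
                have hct := h3 ht
                have hne : (c : Int) ≠ (i + 1) * bar_len := by
                  intro he
                  apply hcnd
                  constructor
                  · omega
                  · simp only [add_sub_cancel_right]
                    rw [he]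
                    exact (PySem.Int.mod_eq_zero_iff_dvd _ _).mpr ⟨i + 1, mul_comm _ _⟩
                push_cast
                omega
              · -- piece_start invariant preserved
                intro hbl
                have hL := hLpos hbl
                have hps := h4 hbl
                rcases hcne with h0 | hnd'
                · subst h0
                  rw [if_neg (by omega)] at hps
                  rw [if_neg (by omega)]
                  exact hps
                · have hc0 : c = 0 ∨ 0 < c := by omega
                  rcases hc0 with h0 | hcpos
                  · subst h0
                    rw [if_neg (by omega)] at hps
                    rw [if_neg (by omega)]
                    exact hps
                  · have hge : bar_len.natAbs < c + 1 ↔ bar_len.natAbs < c := by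
                      constructor
                      · intro h
                        rcases Nat.lt_or_ge bar_len.natAbs c with h' | h'
                        · exact h'
                        · exfalso
                          have : bar_len.natAbs = c := by omega
                          exact hnd' (this ▸ dvd_refl c)
                      · omega
                    have hdiv : (c + 1 - 1) / bar_len.natAbs = (c - 1) / bar_len.natAbs := by
                      rw [Nat.add_sub_cancel]
                      exact div_pred_of_not_dvd bar_len.natAbs c hnd' hcpos
                    by_cases hlc : bar_len.natAbs < c
                    · rw [if_pos hlc] at hps
                      rw [if_pos (hge.mpr hlc), hdiv]
                      exact hps
                    · rw [if_neg hlc] at hps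
                      rw [if_neg (fun h => hlc (hge.mp h))]
                      exact hps
              · -- zero_end still ahead
                intro hz
                by_contra hlt
                have hj1 : j = melody.length - 1 := by omega
                have hg : melody.getD j 0 = 0 := by
                  rw [List.getLast?_eq_getElem?] at hz
                  rw [List.getD, hj1, hz.2]; rfl
                exact hzl ⟨hg, hj1⟩

-- B's start index (bounds[end-bar_len] when i>0, else 1) equals the A-shaped one
-- (bounds[end-|bar_len|] when |bar_len|<end, else 1) on the natural domain.
lemma start_shape (bar_len : Int) (i : Int) (P : List (Nat × Int))
    (hnat : ¬ (bar_len < 0 ∧ i ≤ -3)) (ht : 1 ≤ (i + 1) * bar_len) :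
    (if 0 < i then (((P.getD (((i + 1) * bar_len - bar_len).toNat) (0, 0)).1 : Nat) : Int) else 1)
      = (if (bar_len.natAbs : Int) < (i + 1) * bar_len then
          (((P.getD (((i + 1) * bar_len).toNat - bar_len.natAbs) (0, 0)).1 : Nat) : Int) else 1) := by
  rcases lt_trichotomy bar_len 0 with hneg | hz | hpos
  · have hi1 : i + 1 ≤ -1 := by
      by_contra h
      have h0 : 0 ≤ i + 1 := by omega
      have : (i + 1) * bar_len ≤ 0 := by nlinarith
      omega
    have hi3 : ¬ i ≤ -3 := fun h => hnat ⟨hneg, h⟩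
    have hi : i = -2 := by omega
    have ht2 : (i + 1) * bar_len = -bar_len := by rw [hi]; ring
    rw [if_neg (by omega), if_neg (by rw [ht2]; omega)]
  · rw [hz, mul_zero] at ht
    omega
  · have hi0 : 0 ≤ i := by
      by_contra h
      have : (i + 1) * bar_len ≤ 0 := by nlinarith
      omega
    by_cases hip : 0 < i
    · have h2 : 2 * bar_len ≤ (i + 1) * bar_len :=
        mul_le_mul_of_nonneg_right (by omega) (le_of_lt hpos)
      generalize hT : (i + 1) * bar_len = T at ht h2 ⊢
      rw [if_pos hip, if_pos (by omega), show (T - bar_len).toNat = T.toNat - bar_len.natAbs by omega]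
    · have hi : i = 0 := by omega
      have hTb : (i + 1) * bar_len = bar_len := by rw [hi]; ring
      rw [if_neg hip, if_neg (by rw [hTb]; omega)]

lemma coreO_eq_altCore (bar_len : Int) (melody : List Int) (i : Int) (P : List (Nat × Int))
    (hnat : ¬ (bar_len < 0 ∧ i ≤ -3)) :
    coreO bar_len melody i P = altCore bar_len melody i P := by
  have hlen : melody.getLast? = some (0:Int) → 0 < melody.length := by
    intro h
    cases melody with
    | nil => simp at h
    | cons a l => simp
  by_cases hrange : 1 ≤ (i + 1) * bar_len ∧ (i + 1) * bar_len <
      (if melody.getLast? = some (0:Int) then ((P.length : Int) - 1) else (P.length : Int))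
  · have hold : 1 ≤ (i + 1) * bar_len ∧ (i + 1) * bar_len < (P.length : Int) ∧
        ¬((0 < melody.length ∧ melody.getLast? = some (0:Int)) ∧
          (i + 1) * bar_len = (P.length : Int) - 1) := by
      obtain ⟨h1, h2⟩ := hrange
      by_cases hz : melody.getLast? = some (0:Int)
      · rw [if_pos hz] at h2
        exact ⟨h1, by omega, by rintro ⟨-, he⟩; omega⟩
      · rw [if_neg hz] at h2
        exact ⟨h1, h2, by rintro ⟨⟨-, hz'⟩, -⟩; exact hz hz'⟩
    unfold coreO altCore
    rw [if_pos hold, if_pos hrange, start_shape bar_len i P hnat hrange.1]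
  · have hold : ¬(1 ≤ (i + 1) * bar_len ∧ (i + 1) * bar_len < (P.length : Int) ∧
        ¬((0 < melody.length ∧ melody.getLast? = some (0:Int)) ∧
          (i + 1) * bar_len = (P.length : Int) - 1)) := by
      rintro ⟨h1, h2, h3⟩
      apply hrange
      refine ⟨h1, ?_⟩
      by_cases hz : melody.getLast? = some (0:Int)
      · rw [if_pos hz]
        have : ¬ ((i + 1) * bar_len = (P.length : Int) - 1) := fun he => h3 ⟨⟨hlen hz, hz⟩, he⟩
        omega
      · rw [if_neg hz]; exact h2
    unfold coreO altCore
    rw [if_neg hold, if_neg hrange]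
    by_cases hz : melody.getLast? = some (0:Int)
    · rw [if_pos hz, PySem.List.pyGet?_neg_one]
      by_cases hP : P = []
      · subst hP
        rw [if_neg (by rintro ⟨-, h⟩; exact h rfl)]
        rfl
      · rw [if_pos ⟨⟨hlen hz, hz⟩, hP⟩]
    · rw [if_neg hz, if_neg (by rintro ⟨⟨-, hz'⟩, -⟩; exact hz hz')]

-- ===== VERDICT (by name: the statement is the Claim_ definition above) =====
theorem get_bars_Melody_spec : Claim_equal_get_bars_Melody := by
  intro bar_len melody i lt0 _ hPre
  unfold Spec_get_bars_Melody get_bars_Melody get_bars_Melody_alt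
  rw [← coreO_eq_altCore bar_len melody i _ hPre.2.2]
  have h := loopA_eq_coreO bar_len melody i lt0 hPre melody.length 0 0 1 lt0
    (by omega) (by omega) rfl (by omega)
    (by intro h; exact_mod_cast Int.le_of_lt (by omega))
    (by intro _; simp) (by intro h; exact h.1)
  simpa using h
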